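-- pv_equiv track=rewrite | github.com/yingrui/openKMS | backend/app/services/wiki_link_graph.py | _lines_skipping_fenced_code
-- ===== SOURCE A (Python) =====
-- def _lines_skipping_fenced_code(body: str) -> list[tuple[int, str]]:
--     """Yield (line_num, line) for lines outside fenced ``` blocks."""
--     lines = body.splitlines()
--     out: list[tuple[int, str]] = []
--     in_fence = False
--     for i, line in enumerate(lines, 1):
--         stripped = line.strip()
--         if stripped.startswith("```"):
--             in_fence = not in_fence
--             continue
--         if not in_fence:
--             out.append((i, line))
--     return out
-- ===== SOURCE B (Python) =====
-- def _lines_skipping_fenced_code(body: str) -> list[tuple[int, str]]: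
--     """Yield (line_num, line) for lines outside fenced ``` blocks."""
--     lines = body.splitlines()
--     flags = [line.strip().startswith("```") for line in lines]
--     return [(i + 1, line)
--             for i, (line, f) in enumerate(zip(lines, flags))
--             if not f and flags[:i].count(True) % 2 == 0]
-- ===== Notes on version B (the rewrite author's own statement) =====
-- stated objective: alternative
-- what changed: Replaces the sequential in_fence toggle loop with a precomputed per-line fence-flag table and a single filtering comprehension that keeps a line when the number of fence markers strictly before it is even.
import Mathlib
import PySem

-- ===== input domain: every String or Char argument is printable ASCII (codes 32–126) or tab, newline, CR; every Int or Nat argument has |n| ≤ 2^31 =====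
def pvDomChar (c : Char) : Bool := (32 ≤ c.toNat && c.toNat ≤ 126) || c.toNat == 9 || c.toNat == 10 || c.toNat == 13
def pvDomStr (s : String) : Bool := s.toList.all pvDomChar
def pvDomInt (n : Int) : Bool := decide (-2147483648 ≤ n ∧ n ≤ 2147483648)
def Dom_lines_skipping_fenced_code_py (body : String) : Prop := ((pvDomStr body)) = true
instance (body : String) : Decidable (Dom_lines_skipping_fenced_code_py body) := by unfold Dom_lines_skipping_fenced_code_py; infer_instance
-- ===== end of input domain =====

-- B: precomputed fence-flag table + prefix-parity filter instead of A's sequential in_fence toggle (alternative decomposition, return value only).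
-- ===== PORT A =====
def lines_skipping_fenced_code_py (body : String) : List (Int × String) :=
  let lines := PySem.Str.splitlines body
  let st := lines.foldl
    (fun (s : Int × Bool × List (Int × String)) line =>
      let (i, in_fence, out) := s
      let stripped := PySem.Str.strip line
      if PySem.Str.startswith stripped "```" then (i + 1, !in_fence, out)
      else if !in_fence then (i + 1, in_fence, out ++ [(i, line)])
      else (i + 1, in_fence, out))
    (1, false, [])
  st.2.2

-- ===== PORT B =====
def lines_skipping_fenced_code_py_alt (body : String) : List (Int × String) :=
  let lines := PySem.Str.splitlines body
  let flags := lines.map (fun line => PySem.Str.startswith (PySem.Str.strip line) "```")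
  (PySem.List.enumerate (lines.zip flags) 0).filterMap
    (fun p =>
      if p.2.2 = false && (flags.take p.1.toNat).count true % 2 == 0
      then some (p.1 + 1, p.2.1) else none)

-- ===== PRECONDITION & SPEC =====
def Spec_lines_skipping_fenced_code_py (body : String) (out : List (Int × String)) : Prop := out = lines_skipping_fenced_code_py_alt body
instance (body : String) (out : List (Int × String)) : Decidable (Spec_lines_skipping_fenced_code_py body out) := by unfold Spec_lines_skipping_fenced_code_py; infer_instance

-- ===== CLAIM (what is proved, stated in full; the proofs are below) =====
def Claim_equal_lines_skipping_fenced_code_py : Prop := ∀ (body : String), Dom_lines_skipping_fenced_code_py body → Spec_lines_skipping_fenced_code_py body (lines_skipping_fenced_code_py body)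

-- ===== LEMMAS AND PROOFS =====

def pvFlag (l : String) : Bool := PySem.Str.startswith (PySem.Str.strip l) "```"

-- bridge: the sequential toggle recursion both sides are proved equal to
def pvSpec : List String → Int → Bool → List (Int × String)
  | [], _, _ => []
  | l :: ls, i, fence =>
    if pvFlag l then pvSpec ls (i + 1) (!fence)
    else if fence then pvSpec ls (i + 1) fence
    else (i, l) :: pvSpec ls (i + 1) fence

lemma pv_foldlA : ∀ (lines : List String) (i : Int) (fence : Bool) (out : List (Int × String)),
    (lines.foldl
      (fun (s : Int × Bool × List (Int × String)) line =>
        let (i, in_fence, out) := s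
        let stripped := PySem.Str.strip line
        if PySem.Str.startswith stripped "```" then (i + 1, !in_fence, out)
        else if !in_fence then (i + 1, in_fence, out ++ [(i, line)])
        else (i + 1, in_fence, out))
      (i, fence, out)).2.2
    = out ++ pvSpec lines i fence := by
  intro lines
  induction lines with
  | nil => intro i fence out; simp [pvSpec]
  | cons l ls ih =>
    intro i fence out
    simp at ih
    by_cases h : PySem.Chars.startswith (PySem.Chars.strip l.toList) ['`', '`', '`'] = true <;>
      cases fence <;> simp [List.foldl_cons, pvSpec, pvFlag, h, ih]

lemma pv_altB : ∀ (lines : List String) (flags0 : List Bool),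
    ((PySem.List.enumerate (lines.zip (lines.map pvFlag)) (flags0.length : Int)).filterMap
      (fun p =>
        if p.2.2 = false && (((flags0 ++ lines.map pvFlag).take p.1.toNat).count true) % 2 == 0
        then some (p.1 + 1, p.2.1) else none))
    = pvSpec lines ((flags0.length : Int) + 1) (flags0.count true % 2 == 1) := by
  intro lines
  induction lines with
  | nil => intro flags0; simp [pvSpec, PySem.List.enumerate_nil]
  | cons l ls ih =>
    intro flags0
    have htake : (flags0 ++ pvFlag l :: ls.map pvFlag).take flags0.length = flags0 := by
      simp
    have hIH := ih (flags0 ++ [pvFlag l])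
    have hlist : (flags0 ++ [pvFlag l]) ++ ls.map pvFlag = flags0 ++ pvFlag l :: ls.map pvFlag := by
      simp
    rw [hlist] at hIH
    have hlen : (((flags0 ++ [pvFlag l]).length : Int)) = (flags0.length : Int) + 1 := by
      simp
    rw [hlen] at hIH
    have hcnt : (flags0 ++ [pvFlag l]).count true
        = flags0.count true + (if pvFlag l then 1 else 0) := by
      cases h : pvFlag l <;> simp [List.count_append]
    rw [hcnt] at hIH
    rcases Nat.mod_two_eq_zero_or_one (flags0.count true) with hp | hp <;>
      cases h : pvFlag l <;> rw [h] at hIH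
    all_goals simp [Nat.add_mod, hp] at hIH
    all_goals simpa [PySem.List.enumerate_cons, List.zip, pvSpec, h, htake, hp] using hIH

lemma pv_altB0 (lines : List String) :
    ((PySem.List.enumerate (lines.zip (lines.map pvFlag)) 0).filterMap
      (fun p =>
        if p.2.2 = false && (((lines.map pvFlag).take p.1.toNat).count true) % 2 == 0
        then some (p.1 + 1, p.2.1) else none))
    = pvSpec lines 1 false := by
  simpa using pv_altB lines []

-- ===== VERDICT (by name: the statement is the Claim_ definition above) =====
theorem lines_skipping_fenced_code_py_spec : Claim_equal_lines_skipping_fenced_code_py := by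
  intro body _
  unfold Spec_lines_skipping_fenced_code_py
  have hfl : (fun line => PySem.Str.startswith (PySem.Str.strip line) "```") = pvFlag := rfl
  simp only [lines_skipping_fenced_code_py, lines_skipping_fenced_code_py_alt, hfl,
    pv_foldlA, pv_altB0, List.nil_append]
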